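-- pv_equiv track=rewrite | github.com/matthieudemari/SUTD_ILP_Computing2020 | W4S2 - MT/Grades/functions/1005022/find_if_triplet.py | find_if_triplet
-- ===== SOURCE A (Python) =====
-- def find_if_triplet(my_list):
--     has_triplet = False
--     for i in my_list:
--         count = 0
--         for x in my_list:
--             if i == x:
--                 count += 1
--         if count >= 3:
--             has_triplet = True
--             break
--     return has_triplet
-- ===== SOURCE B (Python) =====
-- def find_if_triplet(my_list):
--     counts = {}
--     for i in my_list:
--         c = counts.get(i, 0) + 1
--         if c >= 3:
--             return True
--         counts[i] = c
--     return False
-- ===== Notes on version B (the rewrite author's own statement) =====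
-- stated objective: faster
-- what changed: Replaced the nested rescan (for each element, count it by scanning the whole list again) with a single pass that maintains a hash-map of running counts and returns True the moment any count reaches 3.
import Mathlib
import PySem

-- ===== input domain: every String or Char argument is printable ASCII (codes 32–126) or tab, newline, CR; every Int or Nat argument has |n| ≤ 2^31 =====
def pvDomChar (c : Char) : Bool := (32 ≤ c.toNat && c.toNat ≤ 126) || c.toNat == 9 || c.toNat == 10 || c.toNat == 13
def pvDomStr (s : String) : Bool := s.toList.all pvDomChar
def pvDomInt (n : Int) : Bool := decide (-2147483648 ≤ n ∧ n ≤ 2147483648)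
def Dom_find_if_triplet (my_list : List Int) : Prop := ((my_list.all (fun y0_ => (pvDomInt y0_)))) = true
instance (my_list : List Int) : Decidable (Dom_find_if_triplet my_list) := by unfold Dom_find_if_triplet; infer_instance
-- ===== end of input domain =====

-- B replaces A's quadratic rescan (count each element by scanning the whole list again)
-- with one pass over the list keeping a dict of running counts, returning True as soon
-- as a count reaches 3 (objective: faster).

-- ===== PORT A =====
-- inner loop: count = number of x in my_list with i == x
def pvCountInner (my_list : List Int) (i : Int) : Int :=
  my_list.foldl (fun count x => if i == x then count + 1 else count) 0

-- outer loop with break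
def pvALoop (my_list : List Int) : List Int → Bool
  | [] => false
  | i :: rest =>
    if 3 ≤ pvCountInner my_list i then true else pvALoop my_list rest

def find_if_triplet (my_list : List Int) : Bool := pvALoop my_list my_list

-- ===== PORT B =====
def pvBLoop : List Int → PySem.Dict Int Int → Bool
  | [], _ => false
  | i :: rest, counts =>
    let c := counts.getD i 0 + 1
    if 3 ≤ c then true else pvBLoop rest (counts.insert i c)

def find_if_triplet_alt (my_list : List Int) : Bool := pvBLoop my_list PySem.Dict.empty

-- ===== PRECONDITION & SPEC =====
def Spec_find_if_triplet (my_list : List Int) (out : Bool) : Prop := out = find_if_triplet_alt my_list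
instance (my_list : List Int) (out : Bool) : Decidable (Spec_find_if_triplet my_list out) := by unfold Spec_find_if_triplet; infer_instance

-- ===== CLAIM (what is proved, stated in full; the proofs are below) =====
def Claim_equal_find_if_triplet : Prop := ∀ (my_list : List Int), Dom_find_if_triplet my_list → Spec_find_if_triplet my_list (find_if_triplet my_list)

-- ===== LEMMAS AND PROOFS =====

lemma pvCountInner_eq (l : List Int) (i : Int) : pvCountInner l i = (l.count i : Int) := by
  unfold pvCountInner
  have h : (fun (count : Int) (x : Int) => if i == x then count + 1 else count)
      = (fun (count : Int) (x : Int) => if x == i then count + 1 else count) := by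
    funext c x; simp [BEq.comm]
  rw [h, PySem.List.foldl_beq_add_one]
  simp

lemma pvALoop_eq_true (l xs : List Int) :
    pvALoop l xs = true ↔ ∃ i ∈ xs, 3 ≤ l.count i := by
  induction xs with
  | nil => simp [pvALoop]
  | cons i rest ih =>
    simp only [pvALoop, pvCountInner_eq]
    by_cases h : (3 : Int) ≤ (l.count i : Int)
    · rw [if_pos h]
      exact ⟨fun _ => ⟨i, List.mem_cons_self, by exact_mod_cast h⟩, fun _ => rfl⟩
    · rw [if_neg h, ih]
      constructor
      · rintro ⟨j, hj, hc⟩; exact ⟨j, List.mem_cons_of_mem _ hj, hc⟩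
      · rintro ⟨j, hj, hc⟩
        rcases List.mem_cons.mp hj with rfl | hj
        · exact absurd (by exact_mod_cast hc) h
        · exact ⟨j, hj, hc⟩

lemma pvBLoop_eq_true (t : List Int) (d : PySem.Dict Int Int) (P : Int → Nat)
    (hd : ∀ k, d.getD k 0 = (P k : Int)) (hb : ∀ k, P k ≤ 2) :
    pvBLoop t d = true ↔ ∃ i ∈ t, 3 ≤ P i + t.count i := by
  induction t generalizing d P with
  | nil => simp [pvBLoop]
  | cons i rest ih =>
    simp only [pvBLoop, hd i]
    by_cases h : (3 : Int) ≤ (P i : Int) + 1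
    · rw [if_pos h]
      refine ⟨fun _ => ⟨i, List.mem_cons_self, ?_⟩, fun _ => rfl⟩
      have h2 : 2 ≤ P i := by exact_mod_cast (by omega : (2 : Int) ≤ (P i : Int))
      rw [List.count_cons_self]; omega
    · have hPi : P i ≤ 1 := by
        have : (P i : Int) ≤ 1 := by omega
        exact_mod_cast this
      rw [if_neg h]
      rw [ih (d.insert i ((P i : Int) + 1)) (fun k => if k = i then P k + 1 else P k)
        (by
          intro k
          rw [PySem.Dict.getD_insert]
          by_cases hk : k = i
          · subst hk; simp
          · simp [hk, hd k])
        (by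
          intro k; dsimp only
          by_cases hk : k = i
          · subst hk; rw [if_pos rfl]; omega
          · rw [if_neg hk]; exact hb k)]
      constructor
      · rintro ⟨j, hj, hc⟩
        by_cases hji : j = i
        · subst hji
          refine ⟨j, List.mem_cons_self, ?_⟩
          rw [if_pos rfl] at hc
          rw [List.count_cons_self]; omega
        · refine ⟨j, List.mem_cons_of_mem _ hj, ?_⟩
          rw [if_neg hji] at hc
          rw [List.count_cons_of_ne (Ne.symm hji)]; omega
      · rintro ⟨j, hj, hc⟩
        rcases List.mem_cons.mp hj with rfl | hj
        · rw [List.count_cons_self] at hc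
          have hmem : j ∈ rest := by
            have : 1 ≤ rest.count j := by omega
            exact List.count_pos_iff.mp this
          refine ⟨j, hmem, ?_⟩
          rw [if_pos rfl]; omega
        · by_cases hji : j = i
          · refine ⟨j, hj, ?_⟩
            rw [hji] at hc ⊢
            rw [List.count_cons_self] at hc
            rw [if_pos rfl]; omega
          · refine ⟨j, hj, ?_⟩
            rw [List.count_cons_of_ne (Ne.symm hji)] at hc
            rw [if_neg hji]; omega

lemma find_if_triplet_alt_eq_true (l : List Int) :
    find_if_triplet_alt l = true ↔ ∃ i ∈ l, 3 ≤ l.count i := by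
  unfold find_if_triplet_alt
  rw [pvBLoop_eq_true l PySem.Dict.empty (fun _ => 0) (by simp) (by simp)]
  simp

-- ===== VERDICT (by name: the statement is the Claim_ definition above) =====
theorem find_if_triplet_spec : Claim_equal_find_if_triplet := by
  intro l _
  unfold Spec_find_if_triplet find_if_triplet
  rw [Bool.eq_iff_iff, pvALoop_eq_true, find_if_triplet_alt_eq_true]
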